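-- pv_equiv track=rewrite | github.com/svucyno/Hack101 | Dashboard.py | get_violation_counts
-- ===== SOURCE A (Python) =====
-- def get_violation_counts(violations):
--     counts = {
--         "No Helmet": 0,
--         "Triple Riding": 0,
--         "Speeding": 0
--     }
--     for v in violations:
--         violation_type = v.get("violation", "Unknown")
--         if violation_type in counts:
--             counts[violation_type] += 1
--     return counts
-- ===== SOURCE B (Python) =====
-- def get_violation_counts(violations):
--     return {
--         t: sum(1 for v in violations if v.get("violation", "Unknown") == t)
--         for t in ("No Helmet", "Triple Riding", "Speeding")
--     }
-- ===== Notes on version B (the rewrite author's own statement) =====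
-- stated objective: alternative
-- what changed: Replaces the mutable counter dict updated in one filtered pass by a dict comprehension over the three fixed violation types, each count computed by its own scan of the violations list.
import Mathlib
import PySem

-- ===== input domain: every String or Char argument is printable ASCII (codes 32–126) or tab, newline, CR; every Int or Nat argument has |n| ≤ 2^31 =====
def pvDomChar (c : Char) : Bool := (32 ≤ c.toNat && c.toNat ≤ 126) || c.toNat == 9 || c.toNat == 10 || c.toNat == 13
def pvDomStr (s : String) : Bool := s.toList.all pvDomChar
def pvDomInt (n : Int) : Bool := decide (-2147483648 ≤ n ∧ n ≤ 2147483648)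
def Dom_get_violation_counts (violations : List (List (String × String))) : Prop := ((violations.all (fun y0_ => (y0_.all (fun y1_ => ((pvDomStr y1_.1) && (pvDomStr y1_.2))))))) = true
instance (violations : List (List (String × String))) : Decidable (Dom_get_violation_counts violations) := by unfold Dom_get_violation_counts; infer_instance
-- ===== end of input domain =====

-- B replaces A's single pass over a mutable counter dict by a comprehension over the
-- three fixed type names, counting each type with its own scan (alternative decomposition).

-- ===== PORT A =====
-- v.get("violation", "Unknown") on the association-list dict v
def pvVType (v : List (String × String)) : String :=
  (PySem.Dict.mk v).getD "violation" "Unknown"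

def get_violation_counts (violations : List (List (String × String))) : List (String × Int) :=
  (violations.foldl
    (fun counts v =>
      let violation_type := pvVType v
      if counts.contains violation_type then
        counts.modify violation_type 0 (· + 1)
      else counts)
    (((PySem.Dict.empty.insert "No Helmet" (0 : Int)).insert "Triple Riding" 0).insert "Speeding" 0)).items

-- ===== PORT B =====
def get_violation_counts_alt (violations : List (List (String × String))) : List (String × Int) :=
  ["No Helmet", "Triple Riding", "Speeding"].map
    (fun t => (t, (violations.countP (fun v => pvVType v == t) : Int)))

-- ===== PRECONDITION & SPEC =====
def Spec_get_violation_counts (violations : List (List (String × String))) (out : List (String × Int)) : Prop := out = get_violation_counts_alt violations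
instance (violations : List (List (String × String))) (out : List (String × Int)) : Decidable (Spec_get_violation_counts violations out) := by unfold Spec_get_violation_counts; infer_instance

-- ===== CLAIM (what is proved, stated in full; the proofs are below) =====
def Claim_equal_get_violation_counts : Prop := ∀ (violations : List (List (String × String))), Dom_get_violation_counts violations → Spec_get_violation_counts violations (get_violation_counts violations)

-- ===== LEMMAS AND PROOFS =====

-- the loop invariant: folding A's step over vs from the three-key dict adds each type's count
lemma pv_fold_items (vs : List (List (String × String))) (a b c : Int) :
    (vs.foldl
      (fun counts v =>
        let violation_type := pvVType v
        if counts.contains violation_type then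
          counts.modify violation_type 0 (· + 1)
        else counts)
      (PySem.Dict.mk [("No Helmet", a), ("Triple Riding", b), ("Speeding", c)])).items =
    [("No Helmet", a + (vs.countP (fun v => pvVType v == "No Helmet") : Int)),
     ("Triple Riding", b + (vs.countP (fun v => pvVType v == "Triple Riding") : Int)),
     ("Speeding", c + (vs.countP (fun v => pvVType v == "Speeding") : Int))] := by
  induction vs generalizing a b c with
  | nil => simp
  | cons v vs ih =>
    simp only [List.foldl_cons, List.countP_cons]
    by_cases h1 : pvVType v = "No Helmet"
    · rw [show (let violation_type := pvVType v;
          if (PySem.Dict.mk [("No Helmet", a), ("Triple Riding", b), ("Speeding", c)]).contains violation_type then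
            (PySem.Dict.mk [("No Helmet", a), ("Triple Riding", b), ("Speeding", c)]).modify violation_type 0 (· + 1)
          else PySem.Dict.mk [("No Helmet", a), ("Triple Riding", b), ("Speeding", c)]) =
          PySem.Dict.mk [("No Helmet", a + 1), ("Triple Riding", b), ("Speeding", c)] from by
        simp [h1, PySem.Dict.contains, PySem.Dict.modify, PySem.Dict.insert, PySem.Dict.getD, PySem.Dict.get?],
        ih]
      simp [h1]; omega
    · by_cases h2 : pvVType v = "Triple Riding"
      · rw [show (let violation_type := pvVType v;
            if (PySem.Dict.mk [("No Helmet", a), ("Triple Riding", b), ("Speeding", c)]).contains violation_type then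
              (PySem.Dict.mk [("No Helmet", a), ("Triple Riding", b), ("Speeding", c)]).modify violation_type 0 (· + 1)
            else PySem.Dict.mk [("No Helmet", a), ("Triple Riding", b), ("Speeding", c)]) =
            PySem.Dict.mk [("No Helmet", a), ("Triple Riding", b + 1), ("Speeding", c)] from by
          simp [h2, PySem.Dict.contains, PySem.Dict.modify, PySem.Dict.insert, PySem.Dict.getD, PySem.Dict.get?],
          ih]
        simp [h2]; omega
      · by_cases h3 : pvVType v = "Speeding"
        · rw [show (let violation_type := pvVType v;
              if (PySem.Dict.mk [("No Helmet", a), ("Triple Riding", b), ("Speeding", c)]).contains violation_type then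
                (PySem.Dict.mk [("No Helmet", a), ("Triple Riding", b), ("Speeding", c)]).modify violation_type 0 (· + 1)
              else PySem.Dict.mk [("No Helmet", a), ("Triple Riding", b), ("Speeding", c)]) =
              PySem.Dict.mk [("No Helmet", a), ("Triple Riding", b), ("Speeding", c + 1)] from by
            simp [h3, PySem.Dict.contains, PySem.Dict.modify, PySem.Dict.insert, PySem.Dict.getD, PySem.Dict.get?],
            ih]
          simp [h3]; omega
        · have hc : (PySem.Dict.mk [("No Helmet", a), ("Triple Riding", b), ("Speeding", c)]).contains (pvVType v) = false := by
            simp [PySem.Dict.contains]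
            exact ⟨fun h => h1 h.symm, fun h => h2 h.symm, fun h => h3 h.symm⟩
          simp only [hc, Bool.false_eq_true, if_false, ih]
          simp [h1, h2, h3]

-- ===== VERDICT (by name: the statement is the Claim_ definition above) =====
theorem get_violation_counts_spec : Claim_equal_get_violation_counts := by
  intro violations _
  show get_violation_counts violations = get_violation_counts_alt violations
  have hinit : ((PySem.Dict.empty.insert "No Helmet" (0 : Int)).insert "Triple Riding" 0).insert "Speeding" 0
      = PySem.Dict.mk [("No Helmet", 0), ("Triple Riding", 0), ("Speeding", 0)] := by decide
  simp [get_violation_counts, get_violation_counts_alt, hinit, pv_fold_items]
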